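-- pv_equiv track=rewrite | github.com/Dend0x/MUNI_FI | pb111/00/00/d1_tinyvm.py | arith
-- ===== SOURCE A (Python) =====
-- def as_signed( num: int, bits: int ) -> int:
--     mod = 2 ** bits
--     num = num % mod
--     return num if num < mod // 2 else num - mod
--
-- def arith( op: int, op_1: int, op_2: int ) -> int:
--
--     # Užitečnou vlastností dvojkového doplňkového kódu je, že
--     # operace sčítání (odečítání) a násobení se provádí zcela
--     # stejně, jako jejich bezznaménkové verze – platí:
--     #
--     #  ⟦ t(a) + t(b) = t(a + b)
--     #    t(a) - t(b) = t(a - b)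
--     #    t(a) ⋅ t(b) = t(a ⋅ b) ⟧
--     #
--     # Pro dělení podobná rovnost žel neplatí, proto musíme
--     # rozlišovat operace ‹sdiv›/‹udiv› a ‹smod›/‹umod›.
--
--     if op == 0x1: return ( op_1 + op_2 ) % 65536
--     if op == 0x2: return ( op_1 - op_2 ) % 65536
--     if op == 0x3: return ( op_1 * op_2 ) % 65536
--     if op == 0x4: return op_1 // op_2
--     if op == 0x6: return op_1 %  op_2
--
--     # Pro jednoduchost budeme při dělení dodržovat znaménkovou
--     # konvenci, která se používá v jazyce C, a která je žel odlišná
--     # od té, která se používá v jazyce Python.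
--
--     if op == 0x5 or op == 0x7: # signed div/rem
--         dividend = as_signed( op_1, 16 )
--         divisor = as_signed( op_2, 16 )
--         quot, rem = divmod( dividend, divisor )
--
--         if ( dividend > 0 ) != ( divisor > 0 ) and rem != 0:
--             rem -= divisor
--         if quot < 0 and rem != 0:
--             quot += 1
--
--         return ( quot if op == 0x5 else rem ) % 65536
--
--     # Bitové logické operace se provádí po jednotlivých bitech
--     # (číslicích ve dvojkovém zápisu). Každá operace provede na
--     # odpovídajících bitech v operandech příslušnou logickou operaci
--     # (‹and›, ‹or› nebo ‹xor›), čím získá odpovídající bit výsledku.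
--     # Operandy jsou vždy 16bitové.
--
--     if op in [ 0xa, 0xb, 0xc ]:
--         result = 0
--         for idx in range( 16 ):
--             bit_1 = op_1 // 2 ** idx % 2
--             bit_2 = op_2 // 2 ** idx % 2
--
--             if op == 0xa:
--                 bit_r = bit_1 == 1 and bit_2 == 1
--             if op == 0xb:
--                 bit_r = bit_1 == 1 or  bit_2 == 1
--             if op == 0xc:
--                 bit_r = ( bit_1 == 1 ) != ( bit_2 == 1 )
--
--             result += bit_r * 2 ** idx
--
--         return result
--
--     # Bitové posuvy jsou jednoduché – posuv doleva odpovídá násobení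
--     # a posuv doprava dělení příslušnou mocninou dvojky. Při pravých
--     # posuvech (dělení) musíme opět rozlišit bezznaménkovou (‹shr›)
--     # a znaménkovou (‹sar›) verzi. Znaménkový (tzv. aritmetický)
--     # posuv pak lze chápat i jako operaci, která posouvá jednotlivé
--     # bity doprava, ale zleva doplňuje místo nul kopie znaménkového
--     # bitu.
--
--     if op == 0xd:
--         return ( op_1 * 2 ** op_2 ) % 65536
--     if op == 0xe:
--         return ( op_1 // 2 ** op_2 ) % 65536
--     if op == 0xf:
--         return ( as_signed( op_1, 16 ) // 2 ** op_2 ) % 65536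
--
--     assert False
-- ===== SOURCE B (Python) =====
-- def _u16(x: int) -> int:
--     return x % 65536
--
-- def _s16(x: int) -> int:
--     u = x % 65536
--     return u if u < 32768 else u - 65536
--
-- def _tdivmod(a: int, b: int) -> tuple:
--     # C-style division: quotient truncated toward zero, remainder with dividend's sign
--     q = abs(a) // abs(b)
--     if (a < 0) != (b < 0):
--         q = -q
--     return q, a - q * b
--
-- def arith(op: int, op_1: int, op_2: int) -> int:
--
--     if op == 0x5 or op == 0x7:       # signed div/rem, truncation toward zero
--         q, r = _tdivmod(_s16(op_1), _s16(op_2))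
--         return _u16(q if op == 0x5 else r)
--
--     if op in (0xa, 0xb, 0xc):        # native bitwise ops on the 16-bit words
--         u1, u2 = _u16(op_1), _u16(op_2)
--         return u1 & u2 if op == 0xa else (u1 | u2 if op == 0xb else u1 ^ u2)
--
--     if op in (0x1, 0x2, 0x3):        # modular add/sub/mul
--         v = op_1 + op_2 if op == 0x1 else (op_1 - op_2 if op == 0x2 else op_1 * op_2)
--         return _u16(v)
--
--     if op == 0x4: return op_1 // op_2
--     if op == 0x6: return op_1 % op_2
--
--     if op == 0xd: return _u16(op_1 << op_2)
--     if op == 0xe: return _u16(op_1 >> op_2)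
--     if op == 0xf: return _u16(_s16(op_1) >> op_2)
--
--     assert False
-- ===== Notes on version B (the rewrite author's own statement) =====
-- stated objective: simpler
-- what changed: The 16-iteration per-bit loop for ops 0xa/0xb/0xc is replaced by one native bitwise operation on the 16-bit words, the floor-divmod-with-two-corrections signed division (0x5/0x7) by a truncate-toward-zero divmod helper, shifts use << / >>, and the dispatch is regrouped with small _u16/_s16 helpers instead of inline expressions.
-- outside the precondition, e.g. on arith(13, 1, -1): A returns 0.5, B raises ValueError
import Mathlib
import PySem

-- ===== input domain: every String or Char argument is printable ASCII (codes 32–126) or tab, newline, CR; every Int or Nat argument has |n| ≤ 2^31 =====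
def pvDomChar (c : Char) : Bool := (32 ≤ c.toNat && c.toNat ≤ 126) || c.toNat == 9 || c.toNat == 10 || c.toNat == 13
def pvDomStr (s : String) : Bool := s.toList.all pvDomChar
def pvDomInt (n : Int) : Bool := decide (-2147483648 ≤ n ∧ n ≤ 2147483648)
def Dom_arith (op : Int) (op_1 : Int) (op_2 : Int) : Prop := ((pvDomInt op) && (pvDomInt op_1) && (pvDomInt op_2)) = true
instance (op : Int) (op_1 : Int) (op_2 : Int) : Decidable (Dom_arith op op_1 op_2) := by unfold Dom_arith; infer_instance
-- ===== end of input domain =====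

-- B replaces the per-bit loop of ops 0xa/0xb/0xc by one native bitwise operation on the
-- 16-bit words, the floor-divmod-with-corrections signed division (0x5/0x7) by a
-- truncate-toward-zero divmod helper, and regroups the dispatch around _u16/_s16 helpers.

-- ===== PORT A =====
-- helper as_signed (used by A); 2 ** bits ported as 2 ^ bits.toNat, exact for the
-- only call sites bits = 16.
def pvAsSigned (num : Int) (bits : Int) : Int :=
  let m : Int := 2 ^ bits.toNat
  let num' := PySem.Int.mod num m
  if num' < PySem.Int.floordiv m 2 then num' else num' - m

def arith (op : Int) (op_1 : Int) (op_2 : Int) : Int :=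
  if op = 0x1 then PySem.Int.mod (op_1 + op_2) 65536 else
  if op = 0x2 then PySem.Int.mod (op_1 - op_2) 65536 else
  if op = 0x3 then PySem.Int.mod (op_1 * op_2) 65536 else
  if op = 0x4 then PySem.Int.floordiv op_1 op_2 else     -- ZeroDivisionError when op_2 = 0: excluded by Pre_
  if op = 0x6 then PySem.Int.mod op_1 op_2 else          -- likewise
  if op = 0x5 ∨ op = 0x7 then
    let dividend := pvAsSigned op_1 16
    let divisor := pvAsSigned op_2 16
    -- divmod raises ZeroDivisionError when divisor = 0: excluded by Pre_
    let quot := PySem.Int.floordiv dividend divisor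
    let rem := PySem.Int.mod dividend divisor
    let rem2 := if decide (dividend > 0) ≠ decide (divisor > 0) ∧ rem ≠ 0 then rem - divisor else rem
    let quot2 := if quot < 0 ∧ rem2 ≠ 0 then quot + 1 else quot
    PySem.Int.mod (if op = 0x5 then quot2 else rem2) 65536
  else
  if op = 0xa ∨ op = 0xb ∨ op = 0xc then
    -- the 16-iteration bit loop; 2 ** idx ported as 2 ^ idx.toNat (idx ∈ range(16) is nonneg);
    -- Python assigns bit_r under three separate 'if op == …' tests, rendered as a nested if
    (PySem.List.pyRange 0 16 1).foldl (fun result idx =>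
      let bit_1 := PySem.Int.mod (PySem.Int.floordiv op_1 (2 ^ idx.toNat)) 2
      let bit_2 := PySem.Int.mod (PySem.Int.floordiv op_2 (2 ^ idx.toNat)) 2
      let bit_r : Bool :=
        if op = 0xa then decide (bit_1 = 1 ∧ bit_2 = 1)
        else if op = 0xb then decide (bit_1 = 1 ∨ bit_2 = 1)
        else decide ((bit_1 = 1) ≠ (bit_2 = 1))
      result + (if bit_r then 1 else 0) * 2 ^ idx.toNat) 0
  else
  if op = 0xd then PySem.Int.mod (op_1 * 2 ^ op_2.toNat) 65536 else   -- 2 ** op_2: float unless 0 ≤ op_2 (Pre_)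
  if op = 0xe then PySem.Int.mod (PySem.Int.floordiv op_1 (2 ^ op_2.toNat)) 65536 else
  if op = 0xf then PySem.Int.mod (PySem.Int.floordiv (pvAsSigned op_1 16) (2 ^ op_2.toNat)) 65536 else
  0   -- Python: assert False (AssertionError); unreachable under Pre_

-- ===== PORT B =====
-- helpers of Source B: _u16, _s16, _tdivmod
def pvU16 (x : Int) : Int := PySem.Int.mod x 65536

def pvS16 (x : Int) : Int :=
  let u := PySem.Int.mod x 65536
  if u < 32768 then u else u - 65536

def pvTdivmod (a : Int) (b : Int) : Int × Int :=
  let q0 := PySem.Int.floordiv |a| |b|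
  let q := if decide (a < 0) ≠ decide (b < 0) then -q0 else q0
  (q, a - q * b)

def arith_alt (op : Int) (op_1 : Int) (op_2 : Int) : Int :=
  if op = 0x5 ∨ op = 0x7 then
    let qr := pvTdivmod (pvS16 op_1) (pvS16 op_2)
    pvU16 (if op = 0x5 then qr.1 else qr.2)
  else if op = 0xa ∨ op = 0xb ∨ op = 0xc then
    let u1 := pvU16 op_1
    let u2 := pvU16 op_2
    if op = 0xa then PySem.Int.band u1 u2
    else if op = 0xb then PySem.Int.bor u1 u2
    else PySem.Int.bxor u1 u2
  else if op = 0x1 ∨ op = 0x2 ∨ op = 0x3 then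
    let v := if op = 0x1 then op_1 + op_2 else if op = 0x2 then op_1 - op_2 else op_1 * op_2
    pvU16 v
  else if op = 0x4 then PySem.Int.floordiv op_1 op_2
  else if op = 0x6 then PySem.Int.mod op_1 op_2
  else if op = 0xd then pvU16 (op_1 * 2 ^ op_2.toNat)                       -- op_1 << op_2 (ValueError if op_2 < 0: outside Pre_)
  else if op = 0xe then pvU16 (PySem.Int.floordiv op_1 (2 ^ op_2.toNat))    -- op_1 >> op_2
  else if op = 0xf then pvU16 (PySem.Int.floordiv (pvS16 op_1) (2 ^ op_2.toNat))
  else 0   -- Python: assert False; unreachable under Pre_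

-- ===== PRECONDITION & SPEC =====
-- Pre_ excludes exactly: unknown opcodes (AssertionError), zero divisors for 0x4/0x6 and a
-- 16-bit-zero divisor for 0x5/0x7 (ZeroDivisionError), and negative shift counts for
-- 0xd/0xe/0xf, on which A returns a float (not a value of the declared int type).
def Pre_arith (op : Int) (op_1 : Int) (op_2 : Int) : Prop :=
  (op = 0x1 ∨ op = 0x2 ∨ op = 0x3 ∨ op = 0x4 ∨ op = 0x5 ∨ op = 0x6 ∨ op = 0x7 ∨
   op = 0xa ∨ op = 0xb ∨ op = 0xc ∨ op = 0xd ∨ op = 0xe ∨ op = 0xf) ∧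
  ((op = 0x4 ∨ op = 0x6) → op_2 ≠ 0) ∧
  ((op = 0x5 ∨ op = 0x7) → PySem.Int.mod op_2 65536 ≠ 0) ∧
  ((op = 0xd ∨ op = 0xe ∨ op = 0xf) → 0 ≤ op_2)
instance (op : Int) (op_1 : Int) (op_2 : Int) : Decidable (Pre_arith op op_1 op_2) := by
  unfold Pre_arith; infer_instance

def pvWitness_arith : Int × Int × Int := (5, -7, 2)

def Spec_arith (op : Int) (op_1 : Int) (op_2 : Int) (out : Int) : Prop := out = arith_alt op op_1 op_2
instance (op : Int) (op_1 : Int) (op_2 : Int) (out : Int) : Decidable (Spec_arith op op_1 op_2 out) := by unfold Spec_arith; infer_instance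

-- ===== CLAIM (what is proved, stated in full; the proofs are below) =====
def Claim_equal_arith : Prop := ∀ (op : Int) (op_1 : Int) (op_2 : Int), Dom_arith op op_1 op_2 → Pre_arith op op_1 op_2 → Spec_arith op op_1 op_2 (arith op op_1 op_2)

-- ===== LEMMAS AND PROOFS =====

-- Source B's _s16 computes the same value as A's as_signed(·, 16)
theorem pvS16_eq_asSigned (x : Int) : pvS16 x = pvAsSigned x 16 := by
  unfold pvS16 pvAsSigned
  have h : (16:Int).toNat = 16 := rfl
  norm_num [h]

-- A's floor-divmod with the two sign corrections equals B's truncate-toward-zero divmod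
theorem arith_div_eq (D V : Int) (hV : V ≠ 0) :
    (let quot := PySem.Int.floordiv D V
     let rem := PySem.Int.mod D V
     let rem2 := if decide (D > 0) ≠ decide (V > 0) ∧ rem ≠ 0 then rem - V else rem
     let quot2 := if quot < 0 ∧ rem2 ≠ 0 then quot + 1 else quot
     (quot2, rem2)) = pvTdivmod D V := by
  unfold pvTdivmod
  simp only []
  set qf := PySem.Int.floordiv D V with hqf
  set rf := PySem.Int.mod D V with hrf
  have hsum : qf * V + rf = D := PySem.Int.floordiv_mul_add_mod D V
  rcases lt_trichotomy V 0 with hVneg | hV0 | hVpos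
  · have hb := PySem.Int.mod_neg_bounds D hVneg
    rw [← hrf] at hb
    have habsV : |V| = -V := abs_of_neg hVneg
    rcases lt_trichotomy D 0 with hD | hD | hD
    · -- D < 0, V < 0
      have habsD : |D| = -D := abs_of_neg hD
      have hq : PySem.Int.floordiv |D| |V| = qf := by
        rw [habsD, habsV, PySem.Int.floordiv_eq_iff_of_pos (by omega)]
        constructor <;> nlinarith
      rw [hq]
      have hqnn : 0 ≤ qf := by nlinarith
      rw [if_neg (by rintro ⟨h, -⟩; simp at h; omega : ¬ (decide (D > 0) ≠ decide (V > 0) ∧ rf ≠ 0)),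
          if_neg (by omega : ¬ (qf < 0 ∧ rf ≠ 0)),
          if_neg (by simp; omega : ¬ (decide (D < 0) ≠ decide (V < 0)))]
      exact Prod.ext rfl (by omega)
    · -- D = 0, V < 0
      subst hD
      have hq00 : qf = 0 := by
        rcases lt_trichotomy qf 0 with h | h | h
        · nlinarith
        · exact h
        · nlinarith
      have hr00 : rf = 0 := by
        have h2 := hsum; rw [hq00, zero_mul] at h2; omega
      have hq : PySem.Int.floordiv |(0:Int)| |V| = 0 := by
        rw [abs_zero, habsV, PySem.Int.floordiv_eq_iff_of_pos (by omega)]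
        constructor
        · simp
        · simp; omega
      rw [hq, hq00, hr00]
      simp
    · -- D > 0, V < 0
      have habsD : |D| = D := abs_of_pos hD
      have hcB : decide (D < 0) ≠ decide (V < 0) := by simp; omega
      rw [habsD, habsV, if_pos hcB]
      by_cases hr0 : rf = 0
      · have hq : PySem.Int.floordiv D (-V) = -qf := by
          rw [PySem.Int.floordiv_eq_iff_of_pos (by omega)]
          constructor <;> nlinarith
        rw [hq, neg_neg,
            if_neg (by rintro ⟨-, h⟩; exact h hr0 : ¬ (decide (D > 0) ≠ decide (V > 0) ∧ rf ≠ 0)),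
            if_neg (by omega : ¬ (qf < 0 ∧ rf ≠ 0))]
        exact Prod.ext rfl (by omega)
      · have hrneg : rf < 0 := by omega
        have hqneg : qf < 0 := by nlinarith
        have hq : PySem.Int.floordiv D (-V) = -qf - 1 := by
          rw [PySem.Int.floordiv_eq_iff_of_pos (by omega)]
          constructor <;> nlinarith
        rw [hq,
            if_pos (⟨by simp; omega, hr0⟩ : (decide (D > 0) ≠ decide (V > 0) ∧ rf ≠ 0)),
            if_pos (⟨by omega, by omega⟩ : (qf < 0 ∧ rf - V ≠ 0))]
        refine Prod.ext (by ring) (by linear_combination hsum)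
  · omega
  · have hb0 := PySem.Int.mod_nonneg D hVpos
    have hb1 := PySem.Int.mod_lt D hVpos
    rw [← hrf] at hb0 hb1
    have habsV : |V| = V := abs_of_pos hVpos
    rcases lt_trichotomy D 0 with hD | hD | hD
    · -- D < 0, V > 0
      have habsD : |D| = -D := abs_of_neg hD
      have hcB : decide (D < 0) ≠ decide (V < 0) := by simp; omega
      rw [habsD, habsV, if_pos hcB]
      by_cases hr0 : rf = 0
      · have hq : PySem.Int.floordiv (-D) V = -qf := by
          rw [PySem.Int.floordiv_eq_iff_of_pos (by omega)]
          constructor <;> nlinarith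
        rw [hq, neg_neg,
            if_neg (by rintro ⟨-, h⟩; exact h hr0 : ¬ (decide (D > 0) ≠ decide (V > 0) ∧ rf ≠ 0)),
            if_neg (by omega : ¬ (qf < 0 ∧ rf ≠ 0))]
        exact Prod.ext rfl (by omega)
      · have hrpos : 0 < rf := by omega
        have hqneg : qf < 0 := by nlinarith
        have hq : PySem.Int.floordiv (-D) V = -qf - 1 := by
          rw [PySem.Int.floordiv_eq_iff_of_pos (by omega)]
          constructor <;> nlinarith
        rw [hq,
            if_pos (⟨by simp; omega, hr0⟩ : (decide (D > 0) ≠ decide (V > 0) ∧ rf ≠ 0)),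
            if_pos (⟨by omega, by omega⟩ : (qf < 0 ∧ rf - V ≠ 0))]
        refine Prod.ext (by ring) (by linear_combination hsum)
    · -- D = 0, V > 0
      subst hD
      have hq00 : qf = 0 := by
        rcases lt_trichotomy qf 0 with h | h | h
        · nlinarith
        · exact h
        · nlinarith
      have hr00 : rf = 0 := by
        have h2 := hsum; rw [hq00, zero_mul] at h2; omega
      have hq : PySem.Int.floordiv |(0:Int)| |V| = 0 := by
        rw [abs_zero, habsV, PySem.Int.floordiv_eq_iff_of_pos (by omega)]
        constructor
        · simp
        · simp; omega
      rw [hq, hq00, hr00]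
      simp
    · -- D > 0, V > 0
      have habsD : |D| = D := abs_of_pos hD
      have hq : PySem.Int.floordiv |D| |V| = qf := by rw [habsD, habsV]
      rw [hq]
      have hqnn : 0 ≤ qf := by nlinarith
      rw [if_neg (by rintro ⟨h, -⟩; simp at h; omega : ¬ (decide (D > 0) ≠ decide (V > 0) ∧ rf ≠ 0)),
          if_neg (by omega : ¬ (qf < 0 ∧ rf ≠ 0)),
          if_neg (by simp; omega : ¬ (decide (D < 0) ≠ decide (V < 0)))]
      exact Prod.ext rfl (by omega)

theorem arith_bit_reduce (a : Int) (i : Nat) (hi : i < 16) :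
    PySem.Int.mod (PySem.Int.floordiv a (2 ^ i)) 2
      = PySem.Int.mod (PySem.Int.floordiv (PySem.Int.mod a 65536) (2 ^ i)) 2 := by
  have hp : (0:Int) < 2 ^ i := by positivity
  rw [PySem.Int.mod_eq_emod_of_pos (by norm_num), PySem.Int.mod_eq_emod_of_pos (by norm_num),
      PySem.Int.floordiv_eq_ediv_of_pos hp, PySem.Int.floordiv_eq_ediv_of_pos hp,
      PySem.Int.mod_eq_emod_of_pos (by norm_num)]
  set r := a % 65536 with hr
  set k := a / 65536 with hk
  have hsplit : a = r + 2 * 2 ^ (15 - i) * k * 2 ^ i := by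
    have h2 : (2:Int) * 2 ^ (15 - i) * 2 ^ i = 65536 := by
      have : (15 - i) + i = 15 := by omega
      calc (2:Int) * 2 ^ (15 - i) * 2 ^ i = 2 * 2 ^ ((15 - i) + i) := by rw [pow_add]; ring
        _ = 65536 := by rw [this]; norm_num
    have := Int.emod_add_mul_ediv a 65536
    rw [← hr, ← hk] at this
    linear_combination (-1) * this - k * h2
  calc a / 2 ^ i % 2 = (r + 2 * 2 ^ (15 - i) * k * 2 ^ i) / 2 ^ i % 2 := by rw [← hsplit]
    _ = (r / 2 ^ i + 2 * 2 ^ (15 - i) * k) % 2 := by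
          rw [Int.add_mul_ediv_right _ _ (by positivity : (2:Int) ^ i ≠ 0)]
    _ = (r / 2 ^ i + 2 * (2 ^ (15 - i) * k)) % 2 := by ring_nf
    _ = r / 2 ^ i % 2 := by rw [Int.add_mul_emod_self_left]

theorem arith_bitloop_eq (g : Bool → Bool → Bool) (f : Nat → Nat → Nat)
    (hf : ∀ x y k, (f x y).testBit k = g (x.testBit k) (y.testBit k))
    (N m n : Nat) :
    (PySem.List.pyRange 0 (N : Int) 1).foldl (fun result idx =>
      result + (if g (decide (PySem.Int.mod (PySem.Int.floordiv (m : Int) (2 ^ idx.toNat)) 2 = 1))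
                     (decide (PySem.Int.mod (PySem.Int.floordiv (n : Int) (2 ^ idx.toNat)) 2 = 1))
                then 1 else 0) * 2 ^ idx.toNat) 0
      = ((f m n % 2 ^ N : Nat) : Int) := by
  induction N with
  | zero =>
    simp [PySem.List.pyRange_one_eq_nil (by omega : (0:Int) ≤ 0)]
  | succ N ih =>
    have hcast : ((N + 1 : Nat) : Int) = (N : Int) + 1 := by push_cast; ring
    rw [hcast, PySem.List.pyRange_one_succ_right (by positivity), List.foldl_append, ih]
    have hbit : ∀ (x : Nat), decide (PySem.Int.mod (PySem.Int.floordiv (x : Int) (2 ^ ((N : Int)).toNat)) 2 = 1) = x.testBit N := by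
      intro x
      have h1 : ((N : Int)).toNat = N := Int.toNat_natCast N
      rw [h1]
      have h2 : (2:Int) ^ N = ((2 ^ N : Nat) : Int) := by push_cast; ring
      rw [h2, PySem.Int.floordiv_natCast]
      have h3 : (2:Int) = ((2 : Nat) : Int) := rfl
      rw [h3, PySem.Int.mod_natCast]
      rw [Nat.testBit_eq_decide_div_mod_eq]
      simp only [decide_eq_decide]
      norm_cast
    simp only [List.foldl_cons, List.foldl_nil, hbit]
    rw [← hf]
    have h4 : f m n % 2 ^ (N + 1) = f m n % 2 ^ N + 2 ^ N * ((f m n).testBit N).toNat := by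
      rw [pow_succ, Nat.mod_mul, Nat.toNat_testBit]
    rw [h4]
    have h5 : ((N : Int)).toNat = N := Int.toNat_natCast N
    rw [h5]
    push_cast
    cases h : (f m n).testBit N <;> simp [Bool.toNat]

theorem arith_bit_and_core (a b : Int) :
    (PySem.List.pyRange 0 16 1).foldl (fun result idx =>
      result + (if PySem.Int.mod (PySem.Int.floordiv a (2 ^ idx.toNat)) 2 = 1 ∧
                   PySem.Int.mod (PySem.Int.floordiv b (2 ^ idx.toNat)) 2 = 1
                then 1 else 0) * 2 ^ idx.toNat) 0
      = PySem.Int.band (PySem.Int.mod a 65536) (PySem.Int.mod b 65536) := by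
  have hma : (0:Int) ≤ PySem.Int.mod a 65536 := PySem.Int.mod_nonneg a (by norm_num)
  have hmb : (0:Int) ≤ PySem.Int.mod b 65536 := PySem.Int.mod_nonneg b (by norm_num)
  have hla : PySem.Int.mod a 65536 < 65536 := PySem.Int.mod_lt a (by norm_num)
  have hlb : PySem.Int.mod b 65536 < 65536 := PySem.Int.mod_lt b (by norm_num)
  set m : Nat := (PySem.Int.mod a 65536).toNat with hm
  set n : Nat := (PySem.Int.mod b 65536).toNat with hn
  have hca : PySem.Int.mod a 65536 = (m : Int) := (Int.toNat_of_nonneg hma).symm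
  have hcb : PySem.Int.mod b 65536 = (n : Int) := (Int.toNat_of_nonneg hmb).symm
  have hcong : ∀ (result : Int), ∀ idx ∈ PySem.List.pyRange 0 16 1,
      (fun result (idx : Int) => result + (if PySem.Int.mod (PySem.Int.floordiv a (2 ^ idx.toNat)) 2 = 1 ∧
                   PySem.Int.mod (PySem.Int.floordiv b (2 ^ idx.toNat)) 2 = 1
                then 1 else 0) * 2 ^ idx.toNat) result idx
      = (fun result (idx : Int) => result + (if ((fun x y => x && y) (decide (PySem.Int.mod (PySem.Int.floordiv (m : Int) (2 ^ idx.toNat)) 2 = 1))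
                     (decide (PySem.Int.mod (PySem.Int.floordiv (n : Int) (2 ^ idx.toNat)) 2 = 1)) : Bool)
                then 1 else 0) * 2 ^ idx.toNat) result idx := by
    intro result idx hidx
    rw [PySem.List.mem_pyRange_one] at hidx
    have hlt : idx.toNat < 16 := by omega
    simp only [arith_bit_reduce a idx.toNat hlt, arith_bit_reduce b idx.toNat hlt, hca, hcb]
    simp
  rw [PySem.List.foldl_congr_mem _ _ _ _ hcong]
  have h16 : ((16 : Nat) : Int) = 16 := by norm_num
  have := arith_bitloop_eq (fun x y => x && y) (fun x y => x &&& y) Nat.testBit_land 16 m n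
  rw [h16] at this
  rw [this, hca, hcb, PySem.Int.band_natCast]
  congr 1
  exact Nat.mod_eq_of_lt (Nat.and_lt_two_pow m (by omega))

theorem arith_bit_or_core (a b : Int) :
    (PySem.List.pyRange 0 16 1).foldl (fun result idx =>
      result + (if PySem.Int.mod (PySem.Int.floordiv a (2 ^ idx.toNat)) 2 = 1 ∨
                   PySem.Int.mod (PySem.Int.floordiv b (2 ^ idx.toNat)) 2 = 1
                then 1 else 0) * 2 ^ idx.toNat) 0
      = PySem.Int.bor (PySem.Int.mod a 65536) (PySem.Int.mod b 65536) := by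
  have hma : (0:Int) ≤ PySem.Int.mod a 65536 := PySem.Int.mod_nonneg a (by norm_num)
  have hmb : (0:Int) ≤ PySem.Int.mod b 65536 := PySem.Int.mod_nonneg b (by norm_num)
  have hla : PySem.Int.mod a 65536 < 65536 := PySem.Int.mod_lt a (by norm_num)
  have hlb : PySem.Int.mod b 65536 < 65536 := PySem.Int.mod_lt b (by norm_num)
  set m : Nat := (PySem.Int.mod a 65536).toNat with hm
  set n : Nat := (PySem.Int.mod b 65536).toNat with hn
  have hca : PySem.Int.mod a 65536 = (m : Int) := (Int.toNat_of_nonneg hma).symm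
  have hcb : PySem.Int.mod b 65536 = (n : Int) := (Int.toNat_of_nonneg hmb).symm
  have hcong : ∀ (result : Int), ∀ idx ∈ PySem.List.pyRange 0 16 1,
      (fun result (idx : Int) => result + (if PySem.Int.mod (PySem.Int.floordiv a (2 ^ idx.toNat)) 2 = 1 ∨
                   PySem.Int.mod (PySem.Int.floordiv b (2 ^ idx.toNat)) 2 = 1
                then 1 else 0) * 2 ^ idx.toNat) result idx
      = (fun result (idx : Int) => result + (if ((fun x y => x || y) (decide (PySem.Int.mod (PySem.Int.floordiv (m : Int) (2 ^ idx.toNat)) 2 = 1))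
                     (decide (PySem.Int.mod (PySem.Int.floordiv (n : Int) (2 ^ idx.toNat)) 2 = 1)) : Bool)
                then 1 else 0) * 2 ^ idx.toNat) result idx := by
    intro result idx hidx
    rw [PySem.List.mem_pyRange_one] at hidx
    have hlt : idx.toNat < 16 := by omega
    simp only [arith_bit_reduce a idx.toNat hlt, arith_bit_reduce b idx.toNat hlt, hca, hcb]
    simp
  rw [PySem.List.foldl_congr_mem _ _ _ _ hcong]
  have h16 : ((16 : Nat) : Int) = 16 := by norm_num
  have := arith_bitloop_eq (fun x y => x || y) (fun x y => x ||| y) Nat.testBit_lor 16 m n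
  rw [h16] at this
  rw [this, hca, hcb, PySem.Int.bor_natCast]
  congr 1
  exact Nat.mod_eq_of_lt (Nat.or_lt_two_pow (by omega : m < 2^16) (by omega : n < 2^16))

theorem arith_bit_xor_core (a b : Int) :
    (PySem.List.pyRange 0 16 1).foldl (fun result idx =>
      result + (if (PySem.Int.mod (PySem.Int.floordiv a (2 ^ idx.toNat)) 2 = 1) ≠
                   (PySem.Int.mod (PySem.Int.floordiv b (2 ^ idx.toNat)) 2 = 1)
                then 1 else 0) * 2 ^ idx.toNat) 0
      = PySem.Int.bxor (PySem.Int.mod a 65536) (PySem.Int.mod b 65536) := by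
  have hma : (0:Int) ≤ PySem.Int.mod a 65536 := PySem.Int.mod_nonneg a (by norm_num)
  have hmb : (0:Int) ≤ PySem.Int.mod b 65536 := PySem.Int.mod_nonneg b (by norm_num)
  have hla : PySem.Int.mod a 65536 < 65536 := PySem.Int.mod_lt a (by norm_num)
  have hlb : PySem.Int.mod b 65536 < 65536 := PySem.Int.mod_lt b (by norm_num)
  set m : Nat := (PySem.Int.mod a 65536).toNat with hm
  set n : Nat := (PySem.Int.mod b 65536).toNat with hn
  have hca : PySem.Int.mod a 65536 = (m : Int) := (Int.toNat_of_nonneg hma).symm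
  have hcb : PySem.Int.mod b 65536 = (n : Int) := (Int.toNat_of_nonneg hmb).symm
  have hcong : ∀ (result : Int), ∀ idx ∈ PySem.List.pyRange 0 16 1,
      (fun result (idx : Int) => result + (if (PySem.Int.mod (PySem.Int.floordiv a (2 ^ idx.toNat)) 2 = 1) ≠
                   (PySem.Int.mod (PySem.Int.floordiv b (2 ^ idx.toNat)) 2 = 1)
                then 1 else 0) * 2 ^ idx.toNat) result idx
      = (fun result (idx : Int) => result + (if ((fun x y => x ^^ y) (decide (PySem.Int.mod (PySem.Int.floordiv (m : Int) (2 ^ idx.toNat)) 2 = 1))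
                     (decide (PySem.Int.mod (PySem.Int.floordiv (n : Int) (2 ^ idx.toNat)) 2 = 1)) : Bool)
                then 1 else 0) * 2 ^ idx.toNat) result idx := by
    intro result idx hidx
    rw [PySem.List.mem_pyRange_one] at hidx
    have hlt : idx.toNat < 16 := by omega
    simp only [arith_bit_reduce a idx.toNat hlt, arith_bit_reduce b idx.toNat hlt, hca, hcb]
    simp
  rw [PySem.List.foldl_congr_mem _ _ _ _ hcong]
  have h16 : ((16 : Nat) : Int) = 16 := by norm_num
  have := arith_bitloop_eq (fun x y => x ^^ y) (fun x y => x ^^^ y) Nat.testBit_xor 16 m n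
  rw [h16] at this
  rw [this, hca, hcb, PySem.Int.bxor_natCast]
  congr 1
  exact Nat.mod_eq_of_lt (Nat.xor_lt_two_pow (by omega : m < 2^16) (by omega : n < 2^16))

theorem pv_mod2_nf (x : Int) (k : Nat) :
    PySem.Int.mod (PySem.Int.floordiv x (2 ^ k)) 2 = x / 2 ^ k % 2 := by
  rw [PySem.Int.floordiv_eq_ediv_of_pos (by positivity), PySem.Int.mod_eq_emod_of_pos (by norm_num)]

theorem pv_mod65536_nf (x : Int) : PySem.Int.mod x 65536 = x % 65536 :=
  PySem.Int.mod_eq_emod_of_pos (by norm_num)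

theorem arith_bit_and (a b : Int) :
    List.foldl (fun result idx =>
      result + if a / 2 ^ idx.toNat % 2 = 1 ∧ b / 2 ^ idx.toNat % 2 = 1 then 2 ^ idx.toNat else 0)
      0 (PySem.List.pyRange 0 16)
      = PySem.Int.band (a % 65536) (b % 65536) := by
  have h := arith_bit_and_core a b
  simp only [pv_mod2_nf, pv_mod65536_nf, ite_mul, one_mul, zero_mul] at h
  exact h

theorem arith_bit_or (a b : Int) :
    List.foldl (fun result idx =>
      result + if a / 2 ^ idx.toNat % 2 = 1 ∨ b / 2 ^ idx.toNat % 2 = 1 then 2 ^ idx.toNat else 0)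
      0 (PySem.List.pyRange 0 16)
      = PySem.Int.bor (a % 65536) (b % 65536) := by
  have h := arith_bit_or_core a b
  simp only [pv_mod2_nf, pv_mod65536_nf, ite_mul, one_mul, zero_mul] at h
  exact h

theorem arith_bit_xor (a b : Int) :
    List.foldl (fun result idx =>
      result + if a / 2 ^ idx.toNat % 2 = 1 ↔ b / 2 ^ idx.toNat % 2 = 1 then 0 else 2 ^ idx.toNat)
      0 (PySem.List.pyRange 0 16)
      = PySem.Int.bxor (a % 65536) (b % 65536) := by
  have h := arith_bit_xor_core a b
  simp only [pv_mod2_nf, pv_mod65536_nf, ne_eq, eq_iff_iff, ite_not, ite_mul, one_mul, zero_mul] at h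
  exact h

theorem pvAsSigned_ne_zero (x : Int) (h : PySem.Int.mod x 65536 ≠ 0) : pvAsSigned x 16 ≠ 0 := by
  unfold pvAsSigned
  have h0 : (0:Int) ≤ PySem.Int.mod x 65536 := PySem.Int.mod_nonneg x (by norm_num)
  have h1 : PySem.Int.mod x 65536 < 65536 := PySem.Int.mod_lt x (by norm_num)
  have h2 : ((16:Int)).toNat = 16 := by decide
  have h3 : (2:Int) ^ (16:Nat) = 65536 := by norm_num
  have h4 : PySem.Int.floordiv 65536 2 = 32768 := by decide
  simp only [h2, h3, h4]
  split_ifs <;> omega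

-- ===== VERDICT (by name: the statement is the Claim_ definition above) =====
theorem arith_spec : Claim_equal_arith := by
  intro op op_1 op_2 _ hpre
  unfold Spec_arith
  obtain ⟨hop, h46, h57, hsh⟩ := hpre
  rcases hop with h|h|h|h|h|h|h|h|h|h|h|h|h <;> subst h
  case _ => rfl
  case _ => rfl
  case _ => rfl
  case _ => rfl
  -- op = 0x5 and op = 0x7: the signed-division branch
  case _ =>
    simp only [arith, arith_alt, pvU16, pvS16_eq_asSigned]; norm_num
    have hV : pvAsSigned op_2 16 ≠ 0 := pvAsSigned_ne_zero op_2 (h57 (Or.inl rfl))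
    have h := arith_div_eq (pvAsSigned op_1 16) (pvAsSigned op_2 16) hV
    rw [Prod.ext_iff] at h
    norm_num at h
    rw [h.1]
  case _ => rfl
  case _ =>
    simp only [arith, arith_alt, pvU16, pvS16_eq_asSigned]; norm_num
    have hV : pvAsSigned op_2 16 ≠ 0 := pvAsSigned_ne_zero op_2 (h57 (Or.inr rfl))
    have h := arith_div_eq (pvAsSigned op_1 16) (pvAsSigned op_2 16) hV
    rw [Prod.ext_iff] at h
    norm_num at h
    rw [h.2]
  case _ =>
    simp only [arith, arith_alt, pvU16, pv_mod65536_nf]; norm_num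
    exact arith_bit_and op_1 op_2
  case _ =>
    simp only [arith, arith_alt, pvU16, pv_mod65536_nf]; norm_num
    exact arith_bit_or op_1 op_2
  case _ =>
    simp only [arith, arith_alt, pvU16, pv_mod65536_nf]; norm_num
    exact arith_bit_xor op_1 op_2
  case _ => rfl
  case _ => rfl
  case _ => rfl
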